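-- pv_equiv track=rewrite | github.com/LupusE/fzIRDB2SQL | helper/decoded-ir-cleaner.py | clean_and_deduplicate
-- ===== SOURCE A (Python) =====
-- def extract_button_info(content):
--     buttons = []
--     current_button = {}
--     for line in content:
--         line = line.strip()
--         if line.startswith('name:'):
--             if current_button:
--                 buttons.append(current_button)
--             current_button = {'name': line.split(':')[1].strip(), 'lines': [line]}
--         elif line.startswith(('type:', 'protocol:', 'address:', 'command:')):
--             current_button[line.split(':')[0]] = line.split(':')[1].strip()
--             current_button['lines'].append(line)
--     if current_button:
--         buttons.append(current_button)
--     return buttons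
--
-- def clean_and_deduplicate(original_content, decoded_content):
--     # Extract initial comment block
--     initial_comments = []
--     for line in original_content:
--         if line.strip().startswith('#') or line.startswith('Filetype:') or line.startswith('Version:'):
--             initial_comments.append(line)
--         else:
--             break  # Stop when we hit the first non-comment line
--
--     decoded_buttons = extract_button_info(decoded_content)
--
--     # Remove duplicates
--     unique_buttons = {}
--     duplicates_removed = 0
--     for button in decoded_buttons:
--         if 'name' in button and 'protocol' in button and 'address' in button and 'command' in button:
--             signature = (button['name'], button['protocol'], button['address'], button['command'])
--             if signature not in unique_buttons:
--                 unique_buttons[signature] = button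
--             else:
--                 duplicates_removed += 1
--
--     # Reconstruct the file content
--     cleaned_content = initial_comments  # Start with the initial comments
--
--     # Add buttons with single comment lines in between
--     for i, button in enumerate(unique_buttons.values()):
--         if i > 0:
--             cleaned_content.append('#')
--         cleaned_content.extend(button['lines'])
--
--     return cleaned_content, duplicates_removed
-- ===== SOURCE B (Python) =====
-- def clean_and_deduplicate(original_content, decoded_content):
--     # Single streaming pass: buffer the current button, complete it on the next
--     # 'name:' line or at end of input; no intermediate button list, no dict.
--     initial_comments = []
--     for line in original_content:
--         if not (line.strip().startswith('#') or line.startswith('Filetype:') or line.startswith('Version:')):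
--             break
--         initial_comments.append(line)
--
--     output = list(initial_comments)
--     seen = set()
--     duplicates_removed = 0
--     emitted = 0
--     cur = None  # (fields, lines) of the button currently being read
--
--     def flush():
--         nonlocal duplicates_removed, emitted
--         if cur is None:
--             return
--         fields, lines = cur
--         if 'protocol' in fields and 'address' in fields and 'command' in fields:
--             sig = (fields['name'], fields['protocol'], fields['address'], fields['command'])
--             if sig in seen:
--                 duplicates_removed += 1
--             else:
--                 seen.add(sig)
--                 if emitted > 0:
--                     output.append('#')
--                 output.extend(lines)
--                 emitted += 1
--
--     for raw in decoded_content: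
--         line = raw.strip()
--         if line.startswith('name:'):
--             flush()
--             cur = ({'name': line.split(':')[1].strip()}, [line])
--         elif cur is not None and line.startswith(('type:', 'protocol:', 'address:', 'command:')):
--             cur[0][line.split(':')[0]] = line.split(':')[1].strip()
--             cur[1].append(line)
--     flush()
--     return output, duplicates_removed
-- ===== Notes on version B (the rewrite author's own statement) =====
-- stated objective: simpler
-- what changed: B fuses A's three phases (extract all buttons into dicts, deduplicate through a signature-keyed dict, render from the dict's values) into one streaming pass over decoded_content that buffers only the current button and, when it completes on the next 'name:' line or at end of input, emits it immediately if its signature is new in a 'seen' set or counts it as a duplicate, so the intermediate button list and the dict of buttons disappear.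
-- crash fix: A raises KeyError('lines') whenever decoded_content contains a type:/protocol:/address:/command: line (after strip) before the first name: line; B simply ignores field lines that precede any button and returns the normal result. — e.g. on clean_and_deduplicate([], ["type: tv"]): A raises KeyError, B returns ([], 0)
import Mathlib
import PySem

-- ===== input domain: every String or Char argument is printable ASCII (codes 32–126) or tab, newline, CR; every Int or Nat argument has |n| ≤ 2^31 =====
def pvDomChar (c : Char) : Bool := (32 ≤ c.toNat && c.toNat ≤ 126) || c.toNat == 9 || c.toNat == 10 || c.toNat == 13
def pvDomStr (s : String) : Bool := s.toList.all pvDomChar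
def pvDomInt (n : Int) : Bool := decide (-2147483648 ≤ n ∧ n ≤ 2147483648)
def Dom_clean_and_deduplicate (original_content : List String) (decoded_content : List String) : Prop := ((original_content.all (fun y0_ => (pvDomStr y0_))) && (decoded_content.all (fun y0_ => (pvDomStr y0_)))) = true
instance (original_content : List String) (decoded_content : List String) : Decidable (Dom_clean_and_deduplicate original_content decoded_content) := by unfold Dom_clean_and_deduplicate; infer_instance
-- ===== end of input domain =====

-- B fuses A's three phases (parse all buttons, dedup via a dict, render) into one
-- streaming pass over decoded_content that buffers the current button and emits or
-- counts it the moment it is complete; objective: simpler (no intermediate button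
-- list, no dict of buttons), same asymptotic cost.


-- shared leaf predicates (both Pythons contain these literal tests)
def pvIsComment (l : String) : Bool :=
  PySem.Str.startswith (PySem.Str.strip l) "#" || PySem.Str.startswith l "Filetype:" || PySem.Str.startswith l "Version:"
def pvIsName (line : String) : Bool := PySem.Str.startswith line "name:"
def pvIsKey (line : String) : Bool :=
  PySem.Str.startswith line "type:" || PySem.Str.startswith line "protocol:" ||
  PySem.Str.startswith line "address:" || PySem.Str.startswith line "command:"
-- line.split(':')[i]  (index in range whenever the line starts with '<word>:')
def pvField (line : String) (i : Nat) : String :=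
  ((PySem.Str.split? line ":").getD []).getD i ""
-- (name, protocol, address, command) signature read from a button's field dict
def pvSig (f : PySem.Dict String String) : String × String × String × String :=
  (f.getD "name" "", f.getD "protocol" "", f.getD "address" "", f.getD "command" "")

-- ===== PORT A =====
-- a Python button dict {'name': …, 'lines': […], 'type': …, …}: scalar keys + the 'lines' list
structure PyButton where
  fields : PySem.Dict String String
  lines  : List String

def pvEmptyButton : PyButton := ⟨PySem.Dict.empty, []⟩
-- `if current_button:` (dict truthiness)
def pvTruthy (b : PyButton) : Bool := !b.fields.items.isEmpty || !b.lines.isEmpty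

def ebiStep (st : List PyButton × PyButton) (raw : String) : List PyButton × PyButton :=
  let line := PySem.Str.strip raw
  if pvIsName line then
    (if pvTruthy st.2 then st.1 ++ [st.2] else st.1,
     ⟨PySem.Dict.insert PySem.Dict.empty "name" (PySem.Str.strip (pvField line 1)), [line]⟩)
  else if pvIsKey line then
    (st.1, ⟨st.2.fields.insert (pvField line 0) (PySem.Str.strip (pvField line 1)), st.2.lines ++ [line]⟩)
  else st

def extract_button_info (content : List String) : List PyButton :=
  let r := content.foldl ebiStep ([], pvEmptyButton)
  if pvTruthy r.2 then r.1 ++ [r.2] else r.1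

-- the for-loop with break over original_content
def initComments : List String → List String
  | [] => []
  | l :: rest => if pvIsComment l then l :: initComments rest else []

def dedupStep (st : PySem.Dict (String × String × String × String) PyButton × Int) (b : PyButton) :
    PySem.Dict (String × String × String × String) PyButton × Int :=
  if b.fields.contains "name" && b.fields.contains "protocol" && b.fields.contains "address" && b.fields.contains "command" then
    if st.1.contains (pvSig b.fields) then (st.1, st.2 + 1) else (st.1.insert (pvSig b.fields) b, st.2)
  else st

-- `for i, button in enumerate(...): if i > 0: append('#'); extend(lines)`
def renderStep (st : List String × Nat) (b : PyButton) : List String × Nat :=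
  ((if st.2 > 0 then st.1 ++ ["#"] else st.1) ++ b.lines, st.2 + 1)

def clean_and_deduplicate (original_content : List String) (decoded_content : List String) : List String × Int :=
  let init := initComments original_content
  let ud := (extract_button_info decoded_content).foldl dedupStep (PySem.Dict.empty, 0)
  ((ud.1.values.foldl renderStep (init, 0)).1, ud.2)

-- ===== PORT B =====
structure BState where
  output  : List String
  seen    : PySem.Set (String × String × String × String)
  dups    : Int
  emitted : Nat
  cur     : Option (PySem.Dict String String × List String)

-- complete the buffered button: emit it if new, count it if already seen
def flushB (st : BState) : BState :=
  match st.cur with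
  | none => st
  | some (fields, lines) =>
    if fields.contains "protocol" && fields.contains "address" && fields.contains "command" then
      if PySem.Set.contains st.seen (pvSig fields) then { st with dups := st.dups + 1 }
      else { st with
        seen    := PySem.Set.add st.seen (pvSig fields),
        output  := (if st.emitted > 0 then st.output ++ ["#"] else st.output) ++ lines,
        emitted := st.emitted + 1 }
    else st

def stepB (st : BState) (raw : String) : BState :=
  let line := PySem.Str.strip raw
  if pvIsName line then
    let st' := flushB st
    { st' with cur := some (PySem.Dict.insert PySem.Dict.empty "name" (PySem.Str.strip (pvField line 1)), [line]) }
  else if st.cur.isSome && pvIsKey line then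
    match st.cur with
    | some (fields, lines) =>
        { st with cur := some (fields.insert (pvField line 0) (PySem.Str.strip (pvField line 1)), lines ++ [line]) }
    | none => st
  else st

def clean_and_deduplicate_alt (original_content : List String) (decoded_content : List String) : List String × Int :=
  let st0 : BState := ⟨original_content.takeWhile pvIsComment, PySem.Set.empty, 0, 0, none⟩
  let st := flushB (decoded_content.foldl stepB st0)
  (st.output, st.dups)

-- ===== PRECONDITION & SPEC =====
-- Pre_ excludes exactly the inputs on which A raises KeyError ('lines'): a
-- type:/protocol:/address:/command: line (after strip) before the first name: line.
def Pre_clean_and_deduplicate (original_content : List String) (decoded_content : List String) : Prop :=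
  ((decoded_content.takeWhile (fun l => !pvIsName (PySem.Str.strip l))).all
    (fun l => !pvIsKey (PySem.Str.strip l))) = true
instance (original_content : List String) (decoded_content : List String) : Decidable (Pre_clean_and_deduplicate original_content decoded_content) := by unfold Pre_clean_and_deduplicate; infer_instance

def pvWitness_clean_and_deduplicate : List String × List String :=
  (["# c"], ["name: a", "protocol: NEC", "address: 01 00", "command: 1F", "name: a", "protocol: NEC", "address: 01 00", "command: 1F"])

-- A raises KeyError on any decoded_content with a type:/protocol:/address:/command: line before the
-- first name: line; B simply ignores field lines that precede any button.
def Raises_clean_and_deduplicate (original_content : List String) (decoded_content : List String) : Prop :=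
  ((decoded_content.takeWhile (fun l => !pvIsName (PySem.Str.strip l))).all
    (fun l => !pvIsKey (PySem.Str.strip l))) = false
instance (original_content : List String) (decoded_content : List String) : Decidable (Raises_clean_and_deduplicate original_content decoded_content) := by unfold Raises_clean_and_deduplicate; infer_instance
def pvRaiseWitness_clean_and_deduplicate : List String × List String := ([], ["type: tv"])
def pvRaiseWitnessOut_clean_and_deduplicate : List String × Int := ([], 0)

def Spec_clean_and_deduplicate (original_content : List String) (decoded_content : List String) (out : List String × Int) : Prop := out = clean_and_deduplicate_alt original_content decoded_content
instance (original_content : List String) (decoded_content : List String) (out : List String × Int) : Decidable (Spec_clean_and_deduplicate original_content decoded_content out) := by unfold Spec_clean_and_deduplicate; infer_instance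

-- ===== CLAIM (what is proved, stated in full; the proofs are below) =====
def Claim_equal_clean_and_deduplicate : Prop := ∀ (original_content : List String) (decoded_content : List String), Dom_clean_and_deduplicate original_content decoded_content → Pre_clean_and_deduplicate original_content decoded_content → Spec_clean_and_deduplicate original_content decoded_content (clean_and_deduplicate original_content decoded_content)
def Claim_raises_clean_and_deduplicate : Prop := (∀ (original_content : List String) (decoded_content : List String), Dom_clean_and_deduplicate original_content decoded_content → Raises_clean_and_deduplicate original_content decoded_content → ¬ Pre_clean_and_deduplicate original_content decoded_content) ∧ (Dom_clean_and_deduplicate (pvRaiseWitness_clean_and_deduplicate.1) (pvRaiseWitness_clean_and_deduplicate.2) ∧ Raises_clean_and_deduplicate (pvRaiseWitness_clean_and_deduplicate.1) (pvRaiseWitness_clean_and_deduplicate.2) ∧ clean_and_deduplicate_alt (pvRaiseWitness_clean_and_deduplicate.1) (pvRaiseWitness_clean_and_deduplicate.2) = pvRaiseWitnessOut_clean_and_deduplicate)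

-- ===== LEMMAS AND PROOFS =====

lemma initComments_eq_takeWhile (xs : List String) : initComments xs = xs.takeWhile pvIsComment := by
  induction xs with
  | nil => rfl
  | cons l rest ih =>
    by_cases h : pvIsComment l = true <;> simp [initComments, List.takeWhile_cons, h, ih]

lemma render_snd (vs : List PyButton) : ∀ (acc : List String) (n : Nat),
    (vs.foldl renderStep (acc, n)).2 = n + vs.length := by
  induction vs with
  | nil => intro acc n; simp
  | cons b vs ih => intro acc n; simp [renderStep, ih]; omega

lemma set_contains_keys (u : PySem.Dict (String × String × String × String) PyButton)
    (k : String × String × String × String) :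
    PySem.Set.contains (PySem.Dict.keys u) k = u.contains k := by
  simp only [PySem.Set.contains, PySem.Dict.contains, PySem.Dict.keys,
    List.contains_eq_any_beq, List.any_map]
  simp only [Function.comp_def]
  simp [BEq.comm]

-- proof-side invariant tying B's running state to A's dict-of-unique-buttons state
def pvInv (init : List String) (st : BState)
    (u : PySem.Dict (String × String × String × String) PyButton) (d : Int) : Prop :=
  st.seen = u.keys ∧ st.dups = d ∧ st.emitted = u.values.length ∧
  st.output = (u.values.foldl renderStep (init, 0)).1

lemma flush_sim (init : List String) (st : BState) (u : PySem.Dict (String × String × String × String) PyButton)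
    (d : Int) (f : PySem.Dict String String) (l : List String)
    (hInv : pvInv init st u d) (hcur : st.cur = some (f, l)) (hname : f.contains "name" = true) :
    pvInv init (flushB st) (dedupStep (u, d) ⟨f, l⟩).1 (dedupStep (u, d) ⟨f, l⟩).2 ∧
      (flushB st).cur = some (f, l) := by
  obtain ⟨hseen, hdups, hemit, hout⟩ := hInv
  by_cases hc : (f.contains "protocol" && f.contains "address" && f.contains "command") = true
  · by_cases hmem : u.contains (pvSig f) = true
    · have hsc : PySem.Set.contains st.seen (pvSig f) = true := by
        rw [hseen, set_contains_keys]; exact hmem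
      have hscm : pvSig f ∈ st.seen := by simpa using hsc
      have hfl : flushB st = { st with dups := st.dups + 1 } := by
        unfold flushB; rw [hcur]; simp [hc, hscm]
      have hded : dedupStep (u, d) ⟨f, l⟩ = (u, d + 1) := by
        unfold dedupStep; simp only [hname, Bool.true_and]; simp [hc, hmem]
      rw [hfl, hded]
      exact ⟨⟨hseen, by simp [hdups], hemit, hout⟩, hcur⟩
    · rw [Bool.not_eq_true] at hmem
      have hsc : PySem.Set.contains st.seen (pvSig f) = false := by
        rw [hseen, set_contains_keys]; exact hmem
      have hscm : pvSig f ∉ st.seen := by simpa using hsc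
      have hfl : flushB st = { st with
          seen := PySem.Set.add st.seen (pvSig f),
          output := (if st.emitted > 0 then st.output ++ ["#"] else st.output) ++ l,
          emitted := st.emitted + 1 } := by
        unfold flushB; rw [hcur]; simp [hc, hscm]
      have hded : dedupStep (u, d) ⟨f, l⟩ = (u.insert (pvSig f) ⟨f, l⟩, d) := by
        unfold dedupStep; simp only [hname, Bool.true_and]; simp [hc, hmem]
      rw [hfl, hded]
      have hins : (u.insert (pvSig f) (⟨f, l⟩ : PyButton)).items = u.items ++ [(pvSig f, ⟨f, l⟩)] := by
        simp [PySem.Dict.insert, hmem]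
      refine ⟨⟨?_, hdups, ?_, ?_⟩, hcur⟩
      · have hadd : PySem.Set.add st.seen (pvSig f) = st.seen ++ [pvSig f] := by
          unfold PySem.Set.add; rw [hsc]; simp
        rw [hadd]
        simp [hseen, PySem.Dict.keys, hins]
      · simp [PySem.Dict.values, hins, hemit]
      · simp only [PySem.Dict.values, hins, List.map_append, List.foldl_append]
        simp [renderStep, hout, hemit, render_snd, PySem.Dict.values]
  · rw [Bool.not_eq_true] at hc
    have hfl : flushB st = st := by unfold flushB; rw [hcur]; simp [hc]
    have hded : dedupStep (u, d) ⟨f, l⟩ = (u, d) := by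
      unfold dedupStep; simp only [hname, Bool.true_and]; simp [hc]
    rw [hfl, hded]
    exact ⟨⟨hseen, hdups, hemit, hout⟩, hcur⟩

lemma ebiStep_shift (bs : List PyButton) (c : PyButton) (raw : String) :
    ebiStep (bs, c) raw = (bs ++ (ebiStep ([], c) raw).1, (ebiStep ([], c) raw).2) := by
  unfold ebiStep
  simp only
  split
  · by_cases h : pvTruthy c = true <;> simp [h]
  · split <;> simp

lemma ebi_shift (dc : List String) : ∀ (bs : List PyButton) (c : PyButton),
    dc.foldl ebiStep (bs, c) =
      (bs ++ (dc.foldl ebiStep ([], c)).1, (dc.foldl ebiStep ([], c)).2) := by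
  induction dc with
  | nil => intro bs c; simp
  | cons raw dc ih =>
    intro bs c
    simp only [List.foldl_cons]
    rw [ebiStep_shift bs c raw]
    cases hre : ebiStep ([], c) raw with
    | mk e1 e2 =>
      rw [ih (bs ++ e1) e2, ih e1 e2]
      simp

lemma truthy_of_name {f : PySem.Dict String String} (l : List String)
    (hname : f.contains "name" = true) : pvTruthy ⟨f, l⟩ = true := by
  simp only [pvTruthy, Bool.or_eq_true, Bool.not_eq_eq_eq_not, Bool.not_false]
  left
  simp only [PySem.Dict.contains, List.any_eq_true] at hname
  obtain ⟨p, hp, _⟩ := hname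
  simp [List.isEmpty_iff]
  intro h
  simp [h] at hp

def PreSuf (dc : List String) : Prop :=
  ((dc.takeWhile (fun l => !pvIsName (PySem.Str.strip l))).all
    (fun l => !pvIsKey (PySem.Str.strip l))) = true

set_option maxHeartbeats 1000000 in
lemma main_sim (dc : List String) : ∀ (init : List String) (st : BState)
    (u : PySem.Dict (String × String × String × String) PyButton) (d : Int) (curA : PyButton),
    pvInv init st u d →
    ((st.cur = none ∧ curA = pvEmptyButton ∧ PreSuf dc) ∨
     (∃ f l, st.cur = some (f, l) ∧ curA = ⟨f, l⟩ ∧ f.contains "name" = true)) →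
    (let final := flushB (dc.foldl stepB st)
     let pr := dc.foldl ebiStep ([], curA)
     let allb := pr.1 ++ (if pvTruthy pr.2 then [pr.2] else [])
     let ud := allb.foldl dedupStep (u, d)
     (final.output, final.dups) = ((ud.1.values.foldl renderStep (init, 0)).1, ud.2)) := by
  induction dc with
  | nil =>
    intro init st u d curA hInv hsync
    rcases hsync with ⟨hnone, hA, _⟩ | ⟨f, l, hsome, hA, hname⟩
    · obtain ⟨hseen, hdups, hemit, hout⟩ := hInv
      simp only [List.foldl_nil]
      have hfl : flushB st = st := by unfold flushB; rw [hnone]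
      rw [hfl, hA]
      have : pvTruthy pvEmptyButton = false := by decide
      simp [this, hout, hdups]
    · simp only [List.foldl_nil]
      have := flush_sim init st u d f l hInv hsome hname
      obtain ⟨⟨hseen, hdups, hemit, hout⟩, _⟩ := this
      rw [hA]
      have ht : pvTruthy ⟨f, l⟩ = true := truthy_of_name l hname
      simp only [ht, reduceIte, List.nil_append, List.foldl_cons, List.foldl_nil]
      rw [hout, hdups]
  | cons raw dc ih =>
    intro init st u d curA hInv hsync
    simp only [List.foldl_cons]
    by_cases hn : pvIsName (PySem.Str.strip raw) = true
    · -- name line: B flushes; A emits curA into the button list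
      have hstep : stepB st raw =
          { flushB st with cur := some (PySem.Dict.insert PySem.Dict.empty "name"
              (PySem.Str.strip (pvField (PySem.Str.strip raw) 1)), [PySem.Str.strip raw]) } := by
        unfold stepB; simp [hn]
      have hebi : ebiStep ([], curA) raw =
          (if pvTruthy curA then [curA] else [],
           ⟨PySem.Dict.insert PySem.Dict.empty "name"
              (PySem.Str.strip (pvField (PySem.Str.strip raw) 1)), [PySem.Str.strip raw]⟩) := by
        unfold ebiStep; simp [hn]
      rw [hstep, hebi]
      set f0 := PySem.Dict.insert PySem.Dict.empty "name"
          (PySem.Str.strip (pvField (PySem.Str.strip raw) 1)) with hf0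
      set b0 : PyButton := ⟨f0, [PySem.Str.strip raw]⟩ with hb0
      have hname0 : f0.contains "name" = true := by
        rw [hf0]; exact PySem.Dict.contains_insert_self _ _ _
      rw [ebi_shift dc (if pvTruthy curA then [curA] else []) b0]
      rcases hsync with ⟨hnone, hA, _⟩ | ⟨f, l, hsome, hA, hnameA⟩
      · have hfl : flushB st = st := by unfold flushB; rw [hnone]
        rw [hfl, hA]
        have ht : pvTruthy pvEmptyButton = false := by decide
        simp only [ht, Bool.false_eq_true, reduceIte, List.nil_append]
        have := ih init { st with cur := some (f0, [PySem.Str.strip raw]) } u d b0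
          (by obtain ⟨h1, h2, h3, h4⟩ := hInv; exact ⟨h1, h2, h3, h4⟩)
          (Or.inr ⟨f0, [PySem.Str.strip raw], rfl, rfl, hname0⟩)
        exact this
      · rw [hA]
        have ht : pvTruthy ⟨f, l⟩ = true := truthy_of_name l hnameA
        simp only [ht, if_pos rfl]
        obtain ⟨hInv', _⟩ := flush_sim init st u d f l hInv hsome hnameA
        have := ih init { flushB st with cur := some (f0, [PySem.Str.strip raw]) }
          (dedupStep (u, d) ⟨f, l⟩).1 (dedupStep (u, d) ⟨f, l⟩).2 b0
          (by obtain ⟨h1, h2, h3, h4⟩ := hInv'; exact ⟨h1, h2, h3, h4⟩)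
          (Or.inr ⟨f0, [PySem.Str.strip raw], rfl, rfl, hname0⟩)
        simpa using this
    · rw [Bool.not_eq_true] at hn
      by_cases hk : pvIsKey (PySem.Str.strip raw) = true
      · rcases hsync with ⟨hnone, hA, hpre⟩ | ⟨f, l, hsome, hA, hnameA⟩
        · -- excluded by Pre_: key line before any name line
          exfalso
          unfold PreSuf at hpre
          rw [List.takeWhile_cons, if_pos (by simp [hn])] at hpre
          simp only [List.all_cons, Bool.and_eq_true] at hpre
          exact absurd hpre.1 (by simp [hk])
        · have hstep : stepB st raw = { st with cur := some (f.insert (pvField (PySem.Str.strip raw) 0)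
              (PySem.Str.strip (pvField (PySem.Str.strip raw) 1)), l ++ [PySem.Str.strip raw]) } := by
            unfold stepB
            simp only [hn, Bool.false_eq_true, hsome, Option.isSome_some,
              Bool.true_and, hk, reduceIte]
          have hebi : ebiStep ([], curA) raw = ([], ⟨f.insert (pvField (PySem.Str.strip raw) 0)
              (PySem.Str.strip (pvField (PySem.Str.strip raw) 1)), l ++ [PySem.Str.strip raw]⟩) := by
            unfold ebiStep
            rw [hA]
            simp [hn, hk]
          rw [hstep, hebi]
          have hname' : (f.insert (pvField (PySem.Str.strip raw) 0)
              (PySem.Str.strip (pvField (PySem.Str.strip raw) 1))).contains "name" = true := by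
            rw [PySem.Dict.contains_insert]
            simp [hnameA]
          exact ih init _ u d _
            (by obtain ⟨h1, h2, h3, h4⟩ := hInv; exact ⟨h1, h2, h3, h4⟩)
            (Or.inr ⟨_, _, rfl, rfl, hname'⟩)
      · -- neither name nor key: both sides skip the line
        rw [Bool.not_eq_true] at hk
        have hstep : stepB st raw = st := by
          unfold stepB
          simp [hn, hk]
        have hebi : ebiStep ([], curA) raw = ([], curA) := by
          unfold ebiStep
          simp [hn, hk]
        rw [hstep, hebi]
        refine ih init st u d curA hInv ?_
        rcases hsync with ⟨hnone, hA, hpre⟩ | hr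
        · refine Or.inl ⟨hnone, hA, ?_⟩
          unfold PreSuf at hpre ⊢
          rw [List.takeWhile_cons, if_pos (by simp [hn])] at hpre
          simp only [List.all_cons, Bool.and_eq_true] at hpre
          exact hpre.2
        · exact Or.inr hr

-- ===== VERDICT (by name: the statement is the Claim_ definition above) =====
theorem clean_and_deduplicate_spec : Claim_equal_clean_and_deduplicate := by
  unfold Claim_equal_clean_and_deduplicate
  intro oc dc _ hpre
  unfold Spec_clean_and_deduplicate
  unfold clean_and_deduplicate clean_and_deduplicate_alt extract_button_info
  have hmain := main_sim dc (oc.takeWhile pvIsComment)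
    ⟨oc.takeWhile pvIsComment, PySem.Set.empty, 0, 0, none⟩ PySem.Dict.empty 0 pvEmptyButton
    ⟨rfl, rfl, rfl, rfl⟩ (Or.inl ⟨rfl, rfl, hpre⟩)
  simp only at hmain
  rw [initComments_eq_takeWhile]
  have hif : (if pvTruthy (dc.foldl ebiStep ([], pvEmptyButton)).2
        then (dc.foldl ebiStep ([], pvEmptyButton)).1 ++ [(dc.foldl ebiStep ([], pvEmptyButton)).2]
        else (dc.foldl ebiStep ([], pvEmptyButton)).1) =
      (dc.foldl ebiStep ([], pvEmptyButton)).1 ++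
        (if pvTruthy (dc.foldl ebiStep ([], pvEmptyButton)).2
         then [(dc.foldl ebiStep ([], pvEmptyButton)).2] else []) := by
    split <;> simp
  rw [hif]
  exact hmain.symm

theorem clean_and_deduplicate_raises : Claim_raises_clean_and_deduplicate := by
  unfold Claim_raises_clean_and_deduplicate
  exact ⟨by
    intro oc dc _ hr hp
    unfold Raises_clean_and_deduplicate at hr
    unfold Pre_clean_and_deduplicate at hp
    rw [hp] at hr
    exact absurd hr (by simp), by decide⟩

-- self-check that the crash-fix claim applies at its witness: the region lies outside Pre_
theorem pvRaiseWitnessOutsidePre_ok :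
    ¬ Pre_clean_and_deduplicate pvRaiseWitness_clean_and_deduplicate.1 pvRaiseWitness_clean_and_deduplicate.2 := by
  have h := clean_and_deduplicate_raises
  unfold Claim_raises_clean_and_deduplicate at h
  exact h.1 _ _ (by decide) (by decide)
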